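-- pv_equiv track=rewrite | github.com/pytorch/tensordict | tensordict/_pytree.py | _str_to_tensordictdict
-- ===== SOURCE A (Python) =====
-- from typing import Any, Dict, List, Tuple
--
-- def _str_to_tensordictdict(str_spec: str) -> Tuple[List[str], str]:
--     context_and_child_strings = str_spec[2:-1]
--
--     child_strings = []
--     context_strings = []
--     nested_parentheses = 0
--     start_index = 0
--     for i, char in enumerate(context_and_child_strings):
--         if char == ":":
--             if nested_parentheses == 0:
--                 context_strings.append(context_and_child_strings[start_index:i])
--                 start_index = i + 1
--         elif char == "(":
--             nested_parentheses += 1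
--         elif char == ")":
--             nested_parentheses -= 1
--
--         if nested_parentheses == 0 and char == ",":
--             child_strings.append(context_and_child_strings[start_index:i])
--             start_index = i + 1
--
--     child_strings.append(context_and_child_strings[start_index:])
--     return context_strings, ",".join(child_strings)
-- ===== SOURCE B (Python) =====
-- def _str_to_tensordictdict(str_spec):
--     s = str_spec[2:-1]
--     tokens = []
--     buf = []
--     depth = 0
--     for ch in s:
--         if depth == 0 and ch in (":", ","):
--             tokens.append(("".join(buf), ch))
--             buf = []
--             continue
--         if ch == "(":
--             depth += 1
--         elif ch == ")":
--             depth -= 1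
--         buf.append(ch)
--     tokens.append(("".join(buf), None))
--     context_strings = [seg for seg, t in tokens if t == ":"]
--     child_strings = [seg for seg, t in tokens if t != ":"]
--     return context_strings, ",".join(child_strings)
-- ===== Notes on version B (the rewrite author's own statement) =====
-- stated objective: alternative
-- what changed: Replaces A's shared-cursor index/slice loop that appends into two lists with a tokenize-then-classify pass: one scan emits (segment, terminator) tokens via a character buffer, then comprehensions partition tokens into contexts (terminator ':') and children (the rest).
import Mathlib
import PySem

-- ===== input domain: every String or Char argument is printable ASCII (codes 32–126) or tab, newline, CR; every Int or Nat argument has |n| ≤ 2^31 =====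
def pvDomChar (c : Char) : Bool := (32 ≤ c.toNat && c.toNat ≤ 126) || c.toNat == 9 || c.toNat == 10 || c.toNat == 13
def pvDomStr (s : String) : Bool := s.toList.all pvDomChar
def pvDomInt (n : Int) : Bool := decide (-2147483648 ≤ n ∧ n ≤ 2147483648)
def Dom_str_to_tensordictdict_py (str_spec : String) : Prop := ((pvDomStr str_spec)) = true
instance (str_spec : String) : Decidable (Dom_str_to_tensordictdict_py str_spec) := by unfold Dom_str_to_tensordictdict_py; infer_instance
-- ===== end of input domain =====

-- B replaces A's index/slice loop by a tokenize-then-classify pass (alternative decomposition, same cost).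

-- ===== PORT A =====
-- A's loop body: state = (child_strings, context_strings, nested_parentheses, start_index),
-- input = (i, char) from enumerate; segments are kept as List Char (Python str values).
def pvStepA (s : List Char) (st : List (List Char) × List (List Char) × Int × Int)
    (p : Int × Char) : List (List Char) × List (List Char) × Int × Int :=
  let childs := st.1
  let ctxs := st.2.1
  let depth := st.2.2.1
  let start := st.2.2.2
  let i := p.1
  let c := p.2
  let q : List (List Char) × Int × Int :=
    if c == ':' then
      if depth == 0 then (ctxs ++ [PySem.List.slice s (some start) (some i)], depth, i + 1)
      else (ctxs, depth, start)
    else if c == '(' then (ctxs, depth + 1, start)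
    else if c == ')' then (ctxs, depth - 1, start)
    else (ctxs, depth, start)
  if q.2.1 == 0 && c == ',' then
    (childs ++ [PySem.List.slice s (some q.2.2) (some i)], q.1, q.2.1, i + 1)
  else (childs, q.1, q.2.1, q.2.2)

def str_to_tensordictdict_py (str_spec : String) : List String × String :=
  let s := PySem.List.slice str_spec.toList (some 2) (some (-1))
  let st := (PySem.List.enumerate s 0).foldl (pvStepA s) ([], [], 0, 0)
  let childs := st.1 ++ [PySem.List.slice s (some st.2.2.2) none]
  (st.2.1.map String.ofList, String.ofList (PySem.Chars.join [','] childs))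

-- ===== PORT B =====
-- B's loop body: state = (tokens, buf, depth); a top-level ':' or ',' emits (buf, terminator).
def pvStepB (st : List (List Char × Option Char) × List Char × Int) (c : Char) :
    List (List Char × Option Char) × List Char × Int :=
  let toks := st.1
  let buf := st.2.1
  let depth := st.2.2
  if depth == 0 && (c == ':' || c == ',') then (toks ++ [(buf, some c)], [], depth)
  else
    let depth' := if c == '(' then depth + 1 else if c == ')' then depth - 1 else depth
    (toks, buf ++ [c], depth')

def str_to_tensordictdict_py_alt (str_spec : String) : List String × String :=
  let s := PySem.List.slice str_spec.toList (some 2) (some (-1))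
  let st := s.foldl pvStepB ([], [], 0)
  let toks := st.1 ++ [(st.2.1, none)]
  (((toks.filter (fun t => t.2 == some ':')).map (fun t => String.ofList t.1)),
   String.ofList (PySem.Chars.join [','] ((toks.filter (fun t => t.2 != some ':')).map (·.1))))

-- ===== PRECONDITION & SPEC =====
def Spec_str_to_tensordictdict_py (str_spec : String) (out : List String × String) : Prop := out = str_to_tensordictdict_py_alt str_spec
instance (str_spec : String) (out : List String × String) : Decidable (Spec_str_to_tensordictdict_py str_spec out) := by unfold Spec_str_to_tensordictdict_py; infer_instance

-- ===== CLAIM (what is proved, stated in full; the proofs are below) =====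
def Claim_equal_str_to_tensordictdict_py : Prop := ∀ (str_spec : String), Dom_str_to_tensordictdict_py str_spec → Spec_str_to_tensordictdict_py str_spec (str_to_tensordictdict_py str_spec)

-- ===== LEMMAS AND PROOFS =====

-- finishing steps of the two ports, on loop-final states
def pvFinA (s : List Char) (st : List (List Char) × List (List Char) × Int × Int) :
    List String × String :=
  (st.2.1.map String.ofList,
   String.ofList (PySem.Chars.join [','] (st.1 ++ [PySem.List.slice s (some st.2.2.2) none])))

def pvFinB (st : List (List Char × Option Char) × List Char × Int) : List String × String :=
  let toks := st.1 ++ [(st.2.1, none)]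
  (((toks.filter (fun t => t.2 == some ':')).map (fun t => String.ofList t.1)),
   String.ofList (PySem.Chars.join [','] ((toks.filter (fun t => t.2 != some ':')).map (·.1))))

-- on token lists whose terminators are all ':' or ',', "not ':'" is "','"
theorem pv_filter_ne (toks : List (List Char × Option Char))
    (hterm : ∀ t ∈ toks, t.2 = some ':' ∨ t.2 = some ',') :
    toks.filter (fun t => t.2 != some ':') = toks.filter (fun t => t.2 == some ',') := by
  induction toks with
  | nil => simp
  | cons t ts ihh =>
    have h1 := hterm t (by simp)
    have h2 : ∀ u ∈ ts, u.2 = some ':' ∨ u.2 = some ',' := fun u hu => hterm u (by simp [hu])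
    rcases h1 with h | h <;> simp [List.filter_cons, h, ihh h2]

-- main loop invariant: A run on the enumerate-suffix from index |pre|+|cur| with start |pre|
-- matches B run on the raw suffix with buffer cur, token-wise.
theorem pv_main : ∀ (suf pre cur : List Char) (depth : Int)
    (toks : List (List Char × Option Char)),
    (∀ t ∈ toks, t.2 = some ':' ∨ t.2 = some ',') →
    pvFinA (pre ++ cur ++ suf)
      ((PySem.List.enumerate suf ((pre.length + cur.length : Nat) : Int)).foldl
        (pvStepA (pre ++ cur ++ suf))
        ((toks.filter (fun t => t.2 == some ',')).map (·.1),
         (toks.filter (fun t => t.2 == some ':')).map (·.1),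
         depth, (pre.length : Int)))
    = pvFinB (suf.foldl pvStepB (toks, cur, depth)) := by
  intro suf
  induction suf with
  | nil =>
    intro pre cur depth toks hterm
    simp only [PySem.List.enumerate_nil, List.foldl_nil, List.foldl_nil, List.append_nil]
    simp only [pvFinA, pvFinB, List.filter_append, List.filter_cons, List.filter_nil]
    rw [PySem.List.slice_from_natCast, List.drop_left, pv_filter_ne toks hterm]
    simp [List.map_map, Function.comp]
  | cons c suf ih =>
    intro pre cur depth toks hterm
    rw [PySem.List.enumerate_cons, List.foldl_cons, List.foldl_cons]
    have hslice : ∀ suf' : List Char,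
        PySem.List.slice (pre ++ (cur ++ suf')) (some (pre.length : Int))
          (some ((pre.length : Int) + (cur.length : Int))) = cur := by
      intro suf'
      have h1 : ((pre.length : Int) + (cur.length : Int))
          = ((pre.length + cur.length : Nat) : Int) := by push_cast; ring
      rw [h1, ← List.append_assoc, PySem.List.slice_natCast, List.append_assoc, List.drop_left,
        Nat.add_sub_cancel_left, List.take_left]
    by_cases hd : depth = 0
    · subst hd
      by_cases hc : c = ':'
      · subst hc
        have hA : pvStepA (pre ++ cur ++ ':' :: suf)
            ((toks.filter (fun t => t.2 == some ',')).map (·.1),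
             (toks.filter (fun t => t.2 == some ':')).map (·.1),
             (0 : Int), (pre.length : Int))
            (((pre.length + cur.length : Nat) : Int), ':')
            = ((toks.filter (fun t => t.2 == some ',')).map (·.1),
               (toks.filter (fun t => t.2 == some ':')).map (·.1) ++ [cur],
               0, ((pre.length + cur.length : Nat) : Int) + 1) := by
          simp [pvStepA, List.append_assoc, hslice]
        have hB : pvStepB (toks, cur, (0 : Int)) ':' = (toks ++ [(cur, some ':')], [], 0) := by
          simp [pvStepB]
        rw [hA, hB]
        have key := ih (pre ++ cur ++ [':']) [] 0 (toks ++ [(cur, some ':')])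
          (by intro t ht
              rcases List.mem_append.mp ht with h | h
              · exact hterm t h
              · simp at h; left; simp [h])
        simp only [List.append_assoc, List.singleton_append, List.cons_append, List.nil_append,
          List.append_nil, List.filter_append, List.map_append, List.filter_cons, List.filter_nil,
          List.length_append, List.length_cons, List.length_nil, Nat.cast_add, Nat.cast_one,
          Nat.cast_zero, add_zero, add_assoc] at key ⊢
        simp at key ⊢
        exact key
      · by_cases hc2 : c = ','
        · subst hc2
          have hA : pvStepA (pre ++ cur ++ ',' :: suf)
              ((toks.filter (fun t => t.2 == some ',')).map (·.1),
               (toks.filter (fun t => t.2 == some ':')).map (·.1),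
               (0 : Int), (pre.length : Int))
              (((pre.length + cur.length : Nat) : Int), ',')
              = ((toks.filter (fun t => t.2 == some ',')).map (·.1) ++ [cur],
                 (toks.filter (fun t => t.2 == some ':')).map (·.1),
                 0, ((pre.length + cur.length : Nat) : Int) + 1) := by
            simp [pvStepA, List.append_assoc, hslice]
          have hB : pvStepB (toks, cur, (0 : Int)) ',' = (toks ++ [(cur, some ',')], [], 0) := by
            simp [pvStepB]
          rw [hA, hB]
          have key := ih (pre ++ cur ++ [',']) [] 0 (toks ++ [(cur, some ',')])
            (by intro t ht
                rcases List.mem_append.mp ht with h | h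
                · exact hterm t h
                · simp at h; right; simp [h])
          simp only [List.append_assoc, List.singleton_append, List.cons_append, List.nil_append,
            List.append_nil, List.filter_append, List.map_append, List.filter_cons, List.filter_nil,
            List.length_append, List.length_cons, List.length_nil, Nat.cast_add, Nat.cast_one,
            Nat.cast_zero, add_zero, add_assoc] at key ⊢
          simp at key ⊢
          exact key
        · -- top-level non-delimiter: no split; depth adjusts identically, buffer grows
          have hA : pvStepA (pre ++ cur ++ c :: suf)
              ((toks.filter (fun t => t.2 == some ',')).map (·.1),
               (toks.filter (fun t => t.2 == some ':')).map (·.1),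
               (0 : Int), (pre.length : Int))
              (((pre.length + cur.length : Nat) : Int), c)
              = ((toks.filter (fun t => t.2 == some ',')).map (·.1),
                 (toks.filter (fun t => t.2 == some ':')).map (·.1),
                 (if c = '(' then (0 : Int) + 1 else if c = ')' then (0 : Int) - 1 else 0),
                 (pre.length : Int)) := by
            by_cases ho : c = '('
            · subst ho; simp [pvStepA]
            · by_cases hcl : c = ')'
              · subst hcl; simp [pvStepA]
              · simp [pvStepA, hc, hc2, ho, hcl]
          have hB : pvStepB (toks, cur, (0 : Int)) c
              = (toks, cur ++ [c],
                 (if c = '(' then (0 : Int) + 1 else if c = ')' then (0 : Int) - 1 else 0)) := by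
            simp [pvStepB, hc, hc2]
          rw [hA, hB]
          have key := ih pre (cur ++ [c])
            (if c = '(' then (0 : Int) + 1 else if c = ')' then (0 : Int) - 1 else 0) toks hterm
          simp only [List.append_assoc, List.singleton_append, List.cons_append, List.nil_append,
            List.append_nil, List.length_append, List.length_cons, List.length_nil, Nat.cast_add,
            Nat.cast_one, Nat.cast_zero, add_zero, add_assoc] at key ⊢
          exact key
    · -- depth ≠ 0: no split on either side
      have hA : pvStepA (pre ++ cur ++ c :: suf)
          ((toks.filter (fun t => t.2 == some ',')).map (·.1),
           (toks.filter (fun t => t.2 == some ':')).map (·.1),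
           depth, (pre.length : Int))
          (((pre.length + cur.length : Nat) : Int), c)
          = ((toks.filter (fun t => t.2 == some ',')).map (·.1),
             (toks.filter (fun t => t.2 == some ':')).map (·.1),
             (if c = '(' then depth + 1 else if c = ')' then depth - 1 else depth),
             (pre.length : Int)) := by
        by_cases ho : c = '('
        · subst ho; simp [pvStepA, hd]
        · by_cases hcl : c = ')'
          · subst hcl; simp [pvStepA, hd]
          · by_cases hcc : c = ':'
            · subst hcc; simp [pvStepA, hd]
            · by_cases hc2 : c = ','
              · subst hc2; simp [pvStepA, hd]
              · simp [pvStepA, ho, hcl, hcc, hc2]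
      have hB : pvStepB (toks, cur, depth) c
          = (toks, cur ++ [c],
             (if c = '(' then depth + 1 else if c = ')' then depth - 1 else depth)) := by
        simp [pvStepB, hd]
      rw [hA, hB]
      have key := ih pre (cur ++ [c])
        (if c = '(' then depth + 1 else if c = ')' then depth - 1 else depth) toks hterm
      simp only [List.append_assoc, List.singleton_append, List.cons_append, List.nil_append,
        List.append_nil, List.length_append, List.length_cons, List.length_nil, Nat.cast_add,
        Nat.cast_one, Nat.cast_zero, add_zero, add_assoc] at key ⊢
      exact key

-- ===== VERDICT (by name: the statement is the Claim_ definition above) =====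
theorem str_to_tensordictdict_py_spec : Claim_equal_str_to_tensordictdict_py := by
  intro str_spec _
  unfold Spec_str_to_tensordictdict_py str_to_tensordictdict_py str_to_tensordictdict_py_alt
  have key := pv_main (PySem.List.slice str_spec.toList (some 2) (some (-1))) [] [] 0 []
    (by intro t ht; simp at ht)
  simp only [List.nil_append, List.length_nil, List.filter_nil, List.map_nil, Nat.add_zero,
    Nat.cast_zero] at key
  unfold pvFinA pvFinB at key
  exact key
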